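-- pv_equiv track=rewrite | github.com/alicechi2/Text-ID | textid_final.py | makeSentenceLengths
-- ===== SOURCE A (Python) =====
-- PUNCTUATION = ['.', '!', '?']
--
-- def makeSentenceLengths(s):
--     ''' returns dictionary of the occurance of sentence lengths
--     '''
--
--     wordlist = s.split()
--     counter = 0
--     D = {}
--
--     for i in range(len(wordlist)):
--         if wordlist[i][-1] in PUNCTUATION:
--             counter += 1
--             if counter in D:
--                 num = D[counter]
--                 D[counter] = num + 1
--             else:
--                 D[counter] = 1
--             counter = 0
--         else:
--             counter += 1
--     return D
-- ===== SOURCE B (Python) =====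
-- PUNCTUATION = ['.', '!', '?']
--
-- def makeSentenceLengths(s):
--     '''returns dictionary of the occurrence of sentence lengths'''
--     words = s.split()
--     flags = [i for i, w in enumerate(words) if w[-1] in PUNCTUATION]
--     lengths = [b - a for a, b in zip([-1] + flags, flags)]
--     D = {}
--     for n in lengths:
--         D[n] = D.get(n, 0) + 1
--     return D
-- ===== Notes on version B (the rewrite author's own statement) =====
-- stated objective: alternative
-- what changed: Replaces A's single running-counter loop (reset at each terminated word, tallying into a dict inline) by three passes: collect punctuation-boundary word indices, turn them into sentence lengths via zip-of-adjacent-differences, then tally the lengths into a dict.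
import Mathlib
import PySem

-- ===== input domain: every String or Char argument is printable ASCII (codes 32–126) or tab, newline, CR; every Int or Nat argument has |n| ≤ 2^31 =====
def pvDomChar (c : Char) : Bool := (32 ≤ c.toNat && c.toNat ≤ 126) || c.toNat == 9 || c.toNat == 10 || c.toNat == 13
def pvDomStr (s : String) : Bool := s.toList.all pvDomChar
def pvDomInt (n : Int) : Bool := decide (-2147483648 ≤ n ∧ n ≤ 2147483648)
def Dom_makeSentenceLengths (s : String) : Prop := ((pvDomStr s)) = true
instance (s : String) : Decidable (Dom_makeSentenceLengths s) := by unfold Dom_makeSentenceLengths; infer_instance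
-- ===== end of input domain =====

-- B replaces A's running-counter-with-reset loop by a boundary-index pass, a zip-of-differences
-- pass and a separate tally loop — same values in the same order (objective: alternative decomposition).

-- shared helper: the Python expression `w[-1] in PUNCTUATION` (both sources contain it verbatim)
def pvIsEnd (w : String) : Bool :=
  match PySem.Str.pyGet? w (-1) with
  | some c => decide (c ∈ (['.', '!', '?'] : List Char))
  | none => false

-- ===== PORT A =====
def makeSentenceLengths (s : String) : List (Int × Int) :=
  let wordlist := PySem.Str.split₀ s
  let st := (PySem.List.pyRange 0 (PySem.List.len wordlist) 1).foldl
    (fun (st : Int × PySem.Dict Int Int) i =>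
      if pvIsEnd (PySem.List.pyGetD wordlist i "") then
        let counter := st.1 + 1
        let D := match st.2.get? counter with
          | some num => st.2.insert counter (num + 1)
          | none => st.2.insert counter 1
        (0, D)
      else (st.1 + 1, st.2))
    (0, PySem.Dict.empty)
  st.2.items

-- ===== PORT B =====
def makeSentenceLengths_alt (s : String) : List (Int × Int) :=
  let words := PySem.Str.split₀ s
  let flags := ((PySem.List.enumerate words).filter (fun p => pvIsEnd p.2)).map (·.1)
  let lengths := (List.zip ((-1 : Int) :: flags) flags).map (fun p => p.2 - p.1)
  let D := lengths.foldl (fun (d : PySem.Dict Int Int) n => d.insert n (d.getD n 0 + 1)) PySem.Dict.empty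
  D.items

-- ===== PRECONDITION & SPEC =====
def Spec_makeSentenceLengths (s : String) (out : List (Int × Int)) : Prop := out = makeSentenceLengths_alt s
instance (s : String) (out : List (Int × Int)) : Decidable (Spec_makeSentenceLengths s out) := by unfold Spec_makeSentenceLengths; infer_instance

-- ===== CLAIM (what is proved, stated in full; the proofs are below) =====
def Claim_equal_makeSentenceLengths : Prop := ∀ (s : String), Dom_makeSentenceLengths s → Spec_makeSentenceLengths s (makeSentenceLengths s)

-- ===== LEMMAS AND PROOFS =====

-- the sentence-length stream A's loop tallies, starting with c words already counted
def pvLens (c : Int) : List String → List Int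
  | [] => []
  | w :: ws => if pvIsEnd w then (c + 1) :: pvLens 0 ws else pvLens (c + 1) ws

def pvTally (d : PySem.Dict Int Int) (n : Int) : PySem.Dict Int Int := d.insert n (d.getD n 0 + 1)

lemma pvMatch_eq (D : PySem.Dict Int Int) (k : Int) :
    (match D.get? k with
      | some num => D.insert k (num + 1)
      | none => D.insert k 1) = pvTally D k := by
  cases h : D.get? k <;>
    simp [pvTally, PySem.Dict.getD_eq_get?_getD, h]

lemma pvLoopA (ws : List String) : ∀ (c : Int) (D : PySem.Dict Int Int),
    (ws.foldl (fun (st : Int × PySem.Dict Int Int) w =>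
        if pvIsEnd w then
          (0, match st.2.get? (st.1 + 1) with
              | some num => st.2.insert (st.1 + 1) (num + 1)
              | none => st.2.insert (st.1 + 1) 1)
        else (st.1 + 1, st.2)) (c, D)).2
      = (pvLens c ws).foldl pvTally D := by
  induction ws with
  | nil => intro c D; simp [pvLens]
  | cons w ws ih =>
    intro c D
    rw [List.foldl_cons]
    by_cases h : pvIsEnd w = true
    · rw [if_pos h, ih, pvMatch_eq]
      simp [pvLens, h]
    · rw [if_neg h, ih]
      simp [pvLens, h]

-- boundary indices when enumeration starts at j
def pvFlags (j : Int) (ws : List String) : List Int :=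
  ((PySem.List.enumerate ws j).filter (fun p => pvIsEnd p.2)).map (·.1)

def pvDiffs (p : Int) : List Int → List Int
  | [] => []
  | f :: fs => (f - p) :: pvDiffs f fs

lemma pvZip_diffs (fs : List Int) : ∀ (p : Int),
    (List.zip (p :: fs) fs).map (fun q => q.2 - q.1) = pvDiffs p fs := by
  induction fs with
  | nil => intro p; simp [pvDiffs]
  | cons f fs ih => intro p; simp [pvDiffs, List.zip, ← ih f]

lemma pvFlags_lens (ws : List String) : ∀ (j c p : Int), p = j - 1 - c →
    pvDiffs p (pvFlags j ws) = pvLens c ws := by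
  induction ws with
  | nil => intro j c p _; simp [pvFlags, pvLens, PySem.List.enumerate_nil, pvDiffs]
  | cons w ws ih =>
    intro j c p hp
    by_cases h : pvIsEnd w = true
    · have hf : pvFlags j (w :: ws) = j :: pvFlags (j + 1) ws := by
        simp [pvFlags, PySem.List.enumerate_cons, h]
      rw [hf]
      simp only [pvDiffs]
      rw [ih (j + 1) 0 j (by omega)]
      simp [pvLens, h]
      omega
    · have hf : pvFlags j (w :: ws) = pvFlags (j + 1) ws := by
        simp [pvFlags, PySem.List.enumerate_cons, h]
      rw [hf, ih (j + 1) (c + 1) p (by omega)]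
      simp [pvLens, h]

-- ===== VERDICT (by name: the statement is the Claim_ definition above) =====
theorem makeSentenceLengths_spec : Claim_equal_makeSentenceLengths := by
  intro s _
  unfold Spec_makeSentenceLengths makeSentenceLengths makeSentenceLengths_alt
  simp only []
  rw [PySem.List.foldl_pyRange_zero_pyGetD (PySem.Str.split₀ s) ""
        (fun (st : Int × PySem.Dict Int Int) w =>
          if pvIsEnd w then
            (0, match st.2.get? (st.1 + 1) with
                | some num => st.2.insert (st.1 + 1) (num + 1)
                | none => st.2.insert (st.1 + 1) 1)
          else (st.1 + 1, st.2)) ((0 : Int), PySem.Dict.empty)]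
  rw [pvLoopA, pvZip_diffs]
  rw [show ((PySem.List.enumerate (PySem.Str.split₀ s) 0).filter (fun p => pvIsEnd p.2)).map (·.1)
        = pvFlags 0 (PySem.Str.split₀ s) from rfl]
  rw [pvFlags_lens (PySem.Str.split₀ s) 0 0 (-1) (by norm_num)]
  rfl
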